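-- pv_equiv track=rewrite | github.com/almehdiKrisni/Projet-COMPLEX-Couverture-Graphe | partie2graphe.py | degresSommet
-- ===== SOURCE A (Python) =====
-- def degresSommet(G) :
--
--     # Création d'un tableau (dictionnaire) contenant les degres de chaque sommet du graphe G
--     tab = dict()
--     for v in G[0] :
--         val = 0
--         for e in G[1] :
--             if v in e :
--                 val += 1
--         tab[v] = val
--
--     return tab
-- ===== SOURCE B (Python) =====
-- def degresSommet(G):
--     # One pass over the edges: start every listed vertex at 0, then bump each
--     # endpoint that is a listed vertex (a self-loop counts once, like 'v in e').
--     tab = {v: 0 for v in G[0]}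
--     for (a, b) in G[1]:
--         if a in tab:
--             tab[a] += 1
--         if b in tab and b != a:
--             tab[b] += 1
--     return tab
-- ===== Notes on version B (the rewrite author's own statement) =====
-- stated objective: faster
-- what changed: A scans the entire edge list once per vertex; B builds the zero-initialized degree dict in one pass over the vertices and then makes a single pass over the edges, incrementing each listed endpoint (once for a self-loop, matching 'v in e').
import Mathlib
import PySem

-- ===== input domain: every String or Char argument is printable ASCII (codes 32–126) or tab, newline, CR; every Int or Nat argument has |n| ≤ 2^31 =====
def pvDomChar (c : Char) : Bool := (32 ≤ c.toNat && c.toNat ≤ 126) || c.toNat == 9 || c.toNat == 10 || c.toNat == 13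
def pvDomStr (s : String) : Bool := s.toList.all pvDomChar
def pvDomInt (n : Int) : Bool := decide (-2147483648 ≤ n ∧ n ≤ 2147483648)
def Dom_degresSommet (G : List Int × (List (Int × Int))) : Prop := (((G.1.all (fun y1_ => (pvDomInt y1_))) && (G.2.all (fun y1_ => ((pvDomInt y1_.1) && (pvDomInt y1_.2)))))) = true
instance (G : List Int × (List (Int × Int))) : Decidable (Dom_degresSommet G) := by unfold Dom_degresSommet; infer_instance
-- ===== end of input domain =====

-- B replaces A's per-vertex scan of the whole edge list (O(V*E)) by one pass over the
-- edges incrementing the two endpoints' counters (O(V+E)); objective: faster.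

-- ===== PORT A =====
-- for v in G[0]: val = 0; for e in G[1]: if v in e: val += 1; tab[v] = val
def degresSommet (G : List Int × (List (Int × Int))) : List (Int × Int) :=
  (G.1.foldl (fun tab v =>
      tab.insert v (G.2.foldl (fun val e => if v = e.1 ∨ v = e.2 then val + 1 else val) 0))
    (PySem.Dict.empty : PySem.Dict Int Int)).items

-- ===== PORT B =====
-- body of B's edge loop: if a in tab: tab[a] += 1; if b in tab and b != a: tab[b] += 1
def degStep (t : PySem.Dict Int Int) (e : Int × Int) : PySem.Dict Int Int :=
  let t1 := if t.contains e.1 then t.modify e.1 0 (· + 1) else t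
  if t1.contains e.2 ∧ e.2 ≠ e.1 then t1.modify e.2 0 (· + 1) else t1

def degresSommet_alt (G : List Int × (List (Int × Int))) : List (Int × Int) :=
  let tab0 := G.1.foldl (fun t v => t.insert v 0) (PySem.Dict.empty : PySem.Dict Int Int)
  (G.2.foldl degStep tab0).items

-- ===== PRECONDITION & SPEC =====
def Spec_degresSommet (G : List Int × (List (Int × Int))) (out : List (Int × Int)) : Prop := out = degresSommet_alt G
instance (G : List Int × (List (Int × Int))) (out : List (Int × Int)) : Decidable (Spec_degresSommet G out) := by unfold Spec_degresSommet; infer_instance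

-- ===== CLAIM (what is proved, stated in full; the proofs are below) =====
def Claim_equal_degresSommet : Prop := ∀ (G : List Int × (List (Int × Int))), Dom_degresSommet G → Spec_degresSommet G (degresSommet G)

-- ===== LEMMAS AND PROOFS =====

-- A's inner loop counts the edges containing v.
lemma cnt_eq (v : Int) (es : List (Int × Int)) :
    es.foldl (fun val e => if v = e.1 ∨ v = e.2 then val + 1 else val) 0
      = (es.countP (fun e => decide (v = e.1 ∨ v = e.2)) : Int) := by
  have h := PySem.List.foldl_count_if (fun e => decide (v = e.1 ∨ v = e.2)) es 0
  simpa using h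

-- a foldl of inserts whose value depends only on the key leaves getD = f k on every key
lemma getD_foldl_insert_fun (f : Int → Int) (vs : List Int) (t : PySem.Dict Int Int)
    (h : ∀ k ∈ t.keys, t.getD k 0 = f k) :
    ∀ k ∈ (vs.foldl (fun d v => d.insert v (f v)) t).keys,
      (vs.foldl (fun d v => d.insert v (f v)) t).getD k 0 = f k := by
  induction vs generalizing t with
  | nil => simpa using h
  | cons v vs ih =>
      intro k hk
      refine ih (t.insert v (f v)) ?_ k (by simpa using hk)
      intro k' hk'
      rw [PySem.Dict.getD_insert]
      rcases (PySem.Dict.mem_keys_insert _ _ _ _).1 hk' with h' | h'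
      · simp [h']
      · by_cases hkv : k' = v
        · simp [hkv]
        · simp [hkv, h k' h']

-- one edge step keeps the key list
lemma degStep_keys (t : PySem.Dict Int Int) (e : Int × Int) : (degStep t e).keys = t.keys := by
  simp only [degStep]
  split_ifs with h1 h2 h2
  · rw [PySem.Dict.keys_modify, PySem.Dict.keys_insert_of_contains _ _ h2.1,
        PySem.Dict.keys_modify, PySem.Dict.keys_insert_of_contains _ _ h1]
  · rw [PySem.Dict.keys_modify, PySem.Dict.keys_insert_of_contains _ _ h1]
  · rw [PySem.Dict.keys_modify, PySem.Dict.keys_insert_of_contains _ _ h2.1]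
  · rfl

-- one edge step adds 1 to exactly the listed vertices the edge contains
lemma degStep_getD (t : PySem.Dict Int Int) (e : Int × Int) (k : Int) (hk : k ∈ t.keys) :
    (degStep t e).getD k 0 = t.getD k 0 + (if k = e.1 ∨ k = e.2 then 1 else 0) := by
  have hck : t.contains k = true := by
    rw [PySem.Dict.contains_eq_decide_mem_keys]; simpa using hk
  have hgm : ∀ (d : PySem.Dict Int Int) (a : Int),
      (d.modify a 0 (· + 1)).getD k 0 = d.getD k 0 + (if k = a then 1 else 0) := by
    intro d a
    rw [PySem.Dict.getD_modify]
    by_cases h : k = a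
    · subst h; simp
    · simp [h]
  simp only [degStep]
  set t1 := if t.contains e.1 then t.modify e.1 0 (· + 1) else t with ht1
  have h1g : t1.getD k 0 = t.getD k 0 + (if k = e.1 then 1 else 0) := by
    rw [ht1]
    by_cases h1 : t.contains e.1 = true
    · rw [if_pos h1, hgm]
    · have hk1 : ¬ k = e.1 := fun h => h1 (h ▸ hck)
      rw [if_neg h1]
      simp [hk1]
  have h1c : t1.contains k = true := by
    rw [ht1]
    by_cases h1 : t.contains e.1 = true <;>
      simp [h1, PySem.Dict.contains_modify, hck]
  by_cases h2 : t1.contains e.2 = true ∧ e.2 ≠ e.1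
  · rw [if_pos h2, hgm, h1g]
    have hne := h2.2
    split_ifs <;> omega
  · rw [if_neg h2, h1g]
    rw [not_and_or, not_not] at h2
    rcases h2 with h2 | h2
    · have hk2 : ¬ k = e.2 := fun hkk => h2 (hkk ▸ h1c)
      split_ifs <;> omega
    · split_ifs <;> omega

lemma loop_keys (es : List (Int × Int)) (t : PySem.Dict Int Int) :
    (es.foldl degStep t).keys = t.keys := by
  induction es generalizing t with
  | nil => rfl
  | cons e es ih => simpa [List.foldl_cons, degStep_keys] using ih (degStep t e)

lemma loop_getD (es : List (Int × Int)) (t : PySem.Dict Int Int) (k : Int) (hk : k ∈ t.keys) :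
    (es.foldl degStep t).getD k 0
      = t.getD k 0 + (es.countP (fun e => decide (k = e.1 ∨ k = e.2)) : Int) := by
  induction es generalizing t with
  | nil => simp
  | cons e es ih =>
      have hk' : k ∈ (degStep t e).keys := by rw [degStep_keys]; exact hk
      rw [List.foldl_cons, ih (degStep t e) hk', degStep_getD t e k hk, List.countP_cons]
      by_cases h : k = e.1 ∨ k = e.2
      · simp [h]
        ring
      · simp [h]

-- ===== VERDICT (by name: the statement is the Claim_ definition above) =====
theorem degresSommet_spec : Claim_equal_degresSommet := by
  intro G _
  unfold Spec_degresSommet degresSommet degresSommet_alt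
  set fA : Int → Int :=
    fun v => G.2.foldl (fun val e => if v = e.1 ∨ v = e.2 then val + 1 else val) 0 with hfA
  have hAfold : (G.1.foldl (fun tab v =>
      tab.insert v (G.2.foldl (fun val e => if v = e.1 ∨ v = e.2 then val + 1 else val) 0))
      (PySem.Dict.empty : PySem.Dict Int Int))
      = G.1.foldl (fun d v => d.insert v (fA v)) PySem.Dict.empty := rfl
  rw [hAfold]
  set dA := G.1.foldl (fun d v => d.insert v (fA v)) (PySem.Dict.empty : PySem.Dict Int Int) with hdA
  set t0 := G.1.foldl (fun t v => t.insert v (0 : Int)) (PySem.Dict.empty : PySem.Dict Int Int) with ht0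
  set dB := G.2.foldl degStep t0 with hdB
  have ht0' : t0 = G.1.foldl (fun d v => d.insert v ((fun _ => (0 : Int)) v)) PySem.Dict.empty := rfl
  have hkA : dA.keys = PySem.Set.update ([] : List Int) G.1 := by
    rw [hdA, PySem.Dict.keys_foldl_insert (f := fun _ v => fA v), PySem.Dict.keys_empty]
  have hk0 : t0.keys = PySem.Set.update ([] : List Int) G.1 := by
    rw [ht0, PySem.Dict.keys_foldl_insert (f := fun _ _ => (0 : Int)), PySem.Dict.keys_empty]
  have hkB : dB.keys = t0.keys := loop_keys _ _
  have hndA : dA.keys.Nodup := by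
    rw [hdA]
    exact PySem.Dict.nodup_keys_foldl_insert _ _ _ PySem.Dict.nodup_keys_empty
  have hndB : dB.keys.Nodup := by
    rw [hkB, ht0]
    exact PySem.Dict.nodup_keys_foldl_insert _ _ _ PySem.Dict.nodup_keys_empty
  have hvA : ∀ k ∈ dA.keys, dA.getD k 0 = fA k := by
    rw [hdA]
    exact getD_foldl_insert_fun fA G.1 PySem.Dict.empty (by simp [PySem.Dict.keys_empty])
  have hv0 : ∀ k ∈ t0.keys, t0.getD k 0 = 0 := by
    rw [ht0']
    exact getD_foldl_insert_fun (fun _ => 0) G.1 PySem.Dict.empty (by simp [PySem.Dict.keys_empty])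
  have hvB : ∀ k ∈ dB.keys, dB.getD k 0 = fA k := by
    intro k hk
    have hk0' : k ∈ t0.keys := hkB ▸ hk
    rw [hdB, loop_getD G.2 t0 k hk0', hv0 k hk0']
    simp only [hfA]
    rw [cnt_eq k G.2]
    ring
  rw [PySem.Dict.items_eq_map_keys dA hndA 0, PySem.Dict.items_eq_map_keys dB hndB 0,
      hkA, hkB, hk0]
  refine List.map_congr_left ?_
  intro k hk
  have h1 := hvA k (by rw [hkA]; exact hk)
  have h2 := hvB k (by rw [hkB, hk0]; exact hk)
  rw [h1, h2]
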